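-- pv_equiv track=rewrite | github.com/MTrajK/coding-problems | Arrays/reverse_array_in_groups.py | reverse_array_in_groups
-- ===== SOURCE A (Python) =====
-- def reverse_array_in_groups(arr, k):
--     # Initialize a variable to keep track of sub arrays of length k
--     i = 0
--     n = len(arr)
--     while i<n:
--         # The sub-array can be of length k or less so the right index in chosen accordingly
--         left = i
--         right = min(i+k-1, n-1)
--         while left < right:
--             # After finding the required indices we reverse the array by swapping two elements at a time
--             arr[left], arr[right] = arr[right], arr[left]
--             # Increasing the left index and decreasing the right index.
--             left += 1
--             right -= 1
--         # After succesfully reversing one sub-array move to next by increasing i by a value of k.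
--         i += k
--     return arr
-- ===== SOURCE B (Python) =====
-- def reverse_array_in_groups(arr, k):
--     # Build the result group by group from reversed slices, then splice it
--     # back into arr (mutates and returns the same list object, like A).
--     out = []
--     j = 0
--     n = len(arr)
--     while j < n:
--         out.extend(arr[j:j+k][::-1])
--         j += k
--     arr[:] = out
--     return arr
-- ===== Notes on version B (the rewrite author's own statement) =====
-- stated objective: simpler
-- what changed: replaces the in-place two-pointer swap reversal of each group by building a new list from reversed k-slices and splicing it back, so the inner swap loop and index bookkeeping disappear
import Mathlib
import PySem

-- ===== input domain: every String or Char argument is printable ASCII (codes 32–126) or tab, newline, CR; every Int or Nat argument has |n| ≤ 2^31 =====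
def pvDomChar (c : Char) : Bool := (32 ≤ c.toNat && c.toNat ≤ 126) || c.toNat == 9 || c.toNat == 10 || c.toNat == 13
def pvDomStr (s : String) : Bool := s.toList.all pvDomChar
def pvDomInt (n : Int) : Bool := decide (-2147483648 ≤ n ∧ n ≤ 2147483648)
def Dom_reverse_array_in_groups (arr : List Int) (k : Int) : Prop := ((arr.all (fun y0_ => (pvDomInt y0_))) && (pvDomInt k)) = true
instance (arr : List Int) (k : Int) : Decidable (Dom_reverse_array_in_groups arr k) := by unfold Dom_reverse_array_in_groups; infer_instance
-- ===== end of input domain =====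

-- B replaces A's in-place two-pointer swap reversal of each group by collecting
-- reversed k-slices into a fresh list (simpler decomposition); B splices the result
-- back with arr[:] = out, so the observable mutation of arr matches A's as well.

-- ===== PORT A =====
-- inner while loop: arr[left], arr[right] = arr[right], arr[left]; left += 1; right -= 1
def pvSwapLoop (arr : List Int) (left right : Int) : List Int :=
  if left < right then
    pvSwapLoop
      (PySem.List.pySetD (PySem.List.pySetD arr left (PySem.List.pyGetD arr right 0))
        right (PySem.List.pyGetD arr left 0))
      (left + 1) (right - 1)
  else arr
termination_by (right - left).toNat
decreasing_by omega

-- outer while loop; fuel = arr.length bounds the iteration count whenever the Python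
-- loop terminates (k ≥ 1); for k ≤ 0 with arr ≠ [] Python A diverges (outside Pre_)
def pvOuterA (fuel : Nat) (arr : List Int) (i k n : Int) : List Int :=
  match fuel with
  | 0 => arr
  | fuel + 1 =>
    if i < n then
      pvOuterA fuel (pvSwapLoop arr i (min (i + k - 1) (n - 1))) (i + k) k n
    else arr

def reverse_array_in_groups (arr : List Int) (k : Int) : List Int :=
  pvOuterA arr.length arr 0 k arr.length

-- ===== PORT B =====
-- out.extend(arr[j:j+k][::-1]); j += k  ([::-1] is reversal: PySem.List.slice?_none_none_neg_one)
def pvOuterB (fuel : Nat) (arr out : List Int) (j k n : Int) : List Int :=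
  match fuel with
  | 0 => out
  | fuel + 1 =>
    if j < n then
      pvOuterB fuel arr (out ++ (PySem.List.slice arr (some j) (some (j + k))).reverse) (j + k) k n
    else out

def reverse_array_in_groups_alt (arr : List Int) (k : Int) : List Int :=
  pvOuterB arr.length arr [] 0 k arr.length

-- ===== PRECONDITION & SPEC =====
-- Pre_ excludes exactly the inputs where Python A never returns (it loops forever):
-- k ≤ 0 with a nonempty list (B's Python loops forever there too).
def Pre_reverse_array_in_groups (arr : List Int) (k : Int) : Prop := arr = [] ∨ 1 ≤ k
instance (arr : List Int) (k : Int) : Decidable (Pre_reverse_array_in_groups arr k) := by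
  unfold Pre_reverse_array_in_groups; infer_instance

def pvWitness_reverse_array_in_groups : List Int × Int := ([1, 2, 3, 4, 5], 2)

def Spec_reverse_array_in_groups (arr : List Int) (k : Int) (out : List Int) : Prop := out = reverse_array_in_groups_alt arr k
instance (arr : List Int) (k : Int) (out : List Int) : Decidable (Spec_reverse_array_in_groups arr k out) := by unfold Spec_reverse_array_in_groups; infer_instance

-- ===== CLAIM (what is proved, stated in full; the proofs are below) =====
def Claim_equal_reverse_array_in_groups : Prop := ∀ (arr : List Int) (k : Int), Dom_reverse_array_in_groups arr k → Pre_reverse_array_in_groups arr k → Spec_reverse_array_in_groups arr k (reverse_array_in_groups arr k)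

-- ===== LEMMAS AND PROOFS =====

-- common specification both loops are reduced to: reverse each (km+1)-sized chunk
def gRev (km : Nat) : List Int → List Int
  | [] => []
  | x :: xs => ((x :: xs).take (km + 1)).reverse ++ gRev km ((x :: xs).drop (km + 1))
termination_by l => l.length
decreasing_by simp

lemma gRev_nil (km : Nat) : gRev km [] = [] := by unfold gRev; rfl

lemma gRev_cons (km : Nat) (l : List Int) (h : l ≠ []) :
    gRev km l = (l.take (km + 1)).reverse ++ gRev km (l.drop (km + 1)) := by
  cases l with
  | nil => simp at h
  | cons x xs => conv_lhs => unfold gRev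

-- one swap step of the inner loop, in Nat form
lemma swap_step (arr : List Int) (ln rn : Nat) (h1 : ln < rn) (h2 : rn < arr.length) :
    ((arr.set ln arr[rn]).set rn arr[ln]).take (ln + 1)
      ++ ((((arr.set ln arr[rn]).set rn arr[ln]).drop (ln + 1)).take (rn - ln - 1)).reverse
      ++ ((arr.set ln arr[rn]).set rn arr[ln]).drop rn
    = arr.take ln ++ ((arr.drop ln).take (rn + 1 - ln)).reverse ++ arr.drop (rn + 1) := by
  have hlen : ln < arr.length := lt_trans h1 h2
  have t1 : ((arr.set ln arr[rn]).set rn arr[ln]).take (ln + 1) = arr.take ln ++ [arr[rn]] := by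
    rw [List.take_set_of_le (by omega), List.take_set, List.take_add_one,
        List.getElem?_eq_getElem hlen]
    simp only [Option.toList_some]
    have : (arr.take ln).length = ln := by simp [Nat.min_eq_left (le_of_lt hlen)]
    rw [show (arr.take ln ++ [arr[ln]]).set ln arr[rn]
          = arr.take ln ++ ([arr[ln]].set 0 arr[rn]) from by
      rw [List.set_append_right _ _ (by omega), this]; simp]
    simp
  have t2 : (((arr.set ln arr[rn]).set rn arr[ln]).drop (ln + 1)).take (rn - ln - 1)
      = (arr.drop (ln + 1)).take (rn - ln - 1) := by
    rw [List.drop_set, if_neg (by omega), List.drop_set, if_pos (by omega),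
        List.take_set, List.set_eq_of_length_le (by simp; omega)]
  have t3 : ((arr.set ln arr[rn]).set rn arr[ln]).drop rn = arr[ln] :: arr.drop (rn + 1) := by
    rw [List.drop_set, if_neg (by omega), List.drop_set, if_pos (by omega), Nat.sub_self]
    rw [List.drop_eq_getElem_cons h2]
    simp only [List.set_cons_zero]
  have hmidlen : rn - ln - 1 < (arr.drop (ln + 1)).length := by simp; omega
  have t4 : (arr.drop ln).take (rn + 1 - ln)
      = arr[ln] :: ((arr.drop (ln + 1)).take (rn - ln - 1) ++ [arr[rn]]) := by
    rw [List.drop_eq_getElem_cons hlen, show rn + 1 - ln = (rn - ln - 1 + 1) + 1 from by omega,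
        List.take_succ_cons, List.take_add_one, List.getElem?_eq_getElem hmidlen]
    simp [List.getElem_drop]
    congr 1
    omega
  rw [t1, t2, t3, t4]
  simp

-- pvSwapLoop reverses precisely the segment [l, r] of arr
lemma swapLoop_spec (arr : List Int) (l r : Int) (h0 : 0 ≤ l) (h1 : l ≤ r + 1)
    (h2 : r < arr.length) :
    pvSwapLoop arr l r
      = arr.take l.toNat ++ ((arr.drop l.toNat).take (r + 1 - l).toNat).reverse
          ++ arr.drop (r + 1).toNat := by
  rw [pvSwapLoop]
  by_cases hlr : l < r
  · rw [if_pos hlr]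
    have hr0 : (0:Int) ≤ r := le_trans h0 (le_of_lt hlr)
    have hrn : r.toNat < arr.length := by omega
    rw [PySem.List.pyGetD_eq_getElem arr 0 hr0 (by exact_mod_cast h2),
        PySem.List.pyGetD_eq_getElem arr 0 h0 (by omega)]
    rw [PySem.List.pySetD_of_nonneg arr _ h0]
    rw [PySem.List.pySetD_of_nonneg _ _ hr0]
    rw [swapLoop_spec _ (l + 1) (r - 1) (by omega) (by omega) (by simp; omega)]
    have e1 : (l + 1).toNat = l.toNat + 1 := by omega
    have e2 : (r - 1 + 1 - (l + 1)).toNat = r.toNat - l.toNat - 1 := by omega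
    have e3 : (r - 1 + 1).toNat = r.toNat := by omega
    have e4 : (r + 1 - l).toNat = r.toNat + 1 - l.toNat := by omega
    have e5 : (r + 1).toNat = r.toNat + 1 := by omega
    rw [e1, e2, e3, e4, e5]
    exact swap_step arr l.toNat r.toNat (by omega) hrn
  · rw [if_neg hlr]
    rcases (by omega : l = r + 1 ∨ l = r) with he | he
    · subst he
      simp [List.take_append_drop]
    · subst he
      have hln : l.toNat < arr.length := by omega
      have e4 : (l + 1 - l).toNat = 1 := by omega
      have e5 : (l + 1).toNat = l.toNat + 1 := by omega
      rw [e4, e5, List.drop_eq_getElem_cons hln, List.take_succ_cons, List.take_zero]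
      rw [List.reverse_singleton]
      conv_lhs => rw [← List.take_append_drop (l.toNat + 1) arr]
      rw [List.take_add_one, List.getElem?_eq_getElem hln]
      simp
termination_by (r - l).toNat
decreasing_by omega

-- invariant of B's loop: what is still to be appended is gRev of the unprocessed suffix
lemma outerB_spec (fuel : Nat) (arr : List Int) : ∀ (out : List Int) (j k : Int),
    1 ≤ k → 0 ≤ j → arr.length - j.toNat ≤ fuel →
    pvOuterB fuel arr out j k arr.length = out ++ gRev (k.toNat - 1) (arr.drop j.toNat) := by
  induction fuel with
  | zero =>
    intro out j k hk hj hf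
    have : arr.length ≤ j.toNat := by omega
    simp [pvOuterB, List.drop_eq_nil_of_le this, gRev_nil]
  | succ fuel ih =>
    intro out j k hk hj hf
    by_cases hlt : j < (arr.length : Int)
    · have hjn : j.toNat < arr.length := by omega
      have hjk : (0:Int) ≤ j + k := by omega
      rw [pvOuterB, if_pos hlt,
          ih _ (j + k) k hk hjk (by omega),
          PySem.List.slice_toNat arr hj hjk]
      have hkt : (j + k).toNat - j.toNat = k.toNat := by omega
      have hd : arr.drop (j + k).toNat = (arr.drop j.toNat).drop k.toNat := by
        rw [List.drop_drop]; congr 1; omega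
      have hne : arr.drop j.toNat ≠ [] := by
        simp [List.drop_eq_nil_iff]; omega
      rw [gRev_cons _ _ hne, hkt, hd]
      have : k.toNat - 1 + 1 = k.toNat := by omega
      rw [this, List.append_assoc]
    · rw [pvOuterB, if_neg hlt]
      have : arr.length ≤ j.toNat := by omega
      simp [List.drop_eq_nil_of_le this, gRev_nil]

-- invariant of A's loop: the processed prefix is in place, the rest is gRev of the suffix
lemma outerA_spec (fuel : Nat) : ∀ (arr : List Int) (i k : Int),
    1 ≤ k → 0 ≤ i → arr.length - i.toNat ≤ fuel →
    pvOuterA fuel arr i k arr.length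
      = arr.take i.toNat ++ gRev (k.toNat - 1) (arr.drop i.toNat) := by
  induction fuel with
  | zero =>
    intro arr i k hk hi hf
    have h : arr.length ≤ i.toNat := by omega
    simp [pvOuterA, List.drop_eq_nil_of_le h, gRev_nil, List.take_of_length_le h]
  | succ fuel ih =>
    intro arr i k hk hi hf
    by_cases hlt : i < (arr.length : Int)
    · rw [pvOuterA, if_pos hlt]
      have hin : i.toNat < arr.length := by omega
      have hs := swapLoop_spec arr i (min (i + k - 1) ((arr.length : Int) - 1)) hi
        (by omega) (by omega)
      set it := i.toNat with hit
      set kt := k.toNat with hkt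
      have e1 : (min (i + k - 1) ((arr.length : Int) - 1) + 1 - i).toNat
          = min kt (arr.length - it) := by omega
      have e2 : (min (i + k - 1) ((arr.length : Int) - 1) + 1).toNat
          = min (it + kt) arr.length := by omega
      rw [e1, e2] at hs
      have htk : (arr.drop it).take (min kt (arr.length - it)) = (arr.drop it).take kt := by
        rw [List.take_eq_take_iff]; simp
      have hdk : arr.drop (min (it + kt) arr.length) = arr.drop (it + kt) := by
        by_cases h : it + kt ≤ arr.length
        · rw [min_eq_left h]
        · rw [min_eq_right (by omega), List.drop_length,
              List.drop_eq_nil_of_le (by omega)]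
      rw [htk, hdk] at hs
      set S := (arr.drop it).take kt with hS
      set T := arr.drop (it + kt) with hT
      have hlen : (arr.take it ++ S.reverse ++ T).length = arr.length := by
        simp [hS, hT]; omega
      have ihc := ih (arr.take it ++ S.reverse ++ T) (i + k) k hk (by omega)
        (by rw [hlen]; omega)
      rw [hs]
      rw [show ((arr.take it ++ S.reverse ++ T).length : Int) = (arr.length : Int) from by
        rw [hlen]] at ihc
      rw [ihc]
      have hSlen : S.length = min kt (arr.length - it) := by simp [hS]
      have hXlen : (arr.take it ++ S.reverse).length = min (it + kt) arr.length := by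
        simp [hSlen]; omega
      have eik : (i + k).toNat = it + kt := by omega
      have hdrop : (arr.take it ++ S.reverse ++ T).drop (i + k).toNat = T := by
        rw [eik]
        by_cases h : it + kt ≤ arr.length
        · exact List.drop_left' (by rw [hXlen]; omega)
        · have hT0 : T = [] := by simp [hT, List.drop_eq_nil_iff]; omega
          rw [hT0, List.append_nil]
          exact List.drop_eq_nil_of_le (by rw [hXlen]; omega)
      have htake : (arr.take it ++ S.reverse ++ T).take (i + k).toNat
          = arr.take it ++ S.reverse := by
        rw [eik]
        by_cases h : it + kt ≤ arr.length
        · exact List.take_left' (by rw [hXlen]; omega)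
        · have hT0 : T = [] := by simp [hT, List.drop_eq_nil_iff]; omega
          rw [hT0, List.append_nil]
          exact List.take_of_length_le (by rw [hXlen]; omega)
      rw [hdrop, htake]
      have hne : arr.drop it ≠ [] := by simp [List.drop_eq_nil_iff]; omega
      rw [gRev_cons (kt - 1) (arr.drop it) hne]
      have : kt - 1 + 1 = kt := by omega
      rw [this, List.drop_drop]
      simp [hS, hT, hkt, List.append_assoc]
    · rw [pvOuterA, if_neg hlt]
      have h : arr.length ≤ i.toNat := by omega
      simp [List.drop_eq_nil_of_le h, gRev_nil, List.take_of_length_le h]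

-- ===== VERDICT (by name: the statement is the Claim_ definition above) =====
theorem reverse_array_in_groups_spec : Claim_equal_reverse_array_in_groups := by
  intro arr k _ hpre
  unfold Spec_reverse_array_in_groups reverse_array_in_groups reverse_array_in_groups_alt
  rcases hpre with h | hk
  · subst h; rfl
  · rw [outerA_spec arr.length arr 0 k hk le_rfl (by simp),
        outerB_spec arr.length arr [] 0 k hk le_rfl (by simp)]
    simp
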